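-- pv_equiv track=rewrite | github.com/Adelina2302/HW_manager | HWs/HW4.py | trim_messages_last_n_pairs
-- ===== SOURCE A (Python) =====
-- def trim_messages_last_n_pairs(messages, n_pairs=5):
--     if n_pairs <= 0:
--         return []
--     tail = []
--     user_count = 0
--     for m in reversed(messages):
--         tail.append(m)
--         if m.get("role") == "user":
--             user_count += 1
--             if user_count >= n_pairs:
--                 break
--     return list(reversed(tail))
-- ===== SOURCE B (Python) =====
-- def trim_messages_last_n_pairs(messages, n_pairs=5):
--     if n_pairs <= 0:
--         return []
--     total = sum(1 for m in messages if m.get("role") == "user")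
--     if total < n_pairs:
--         return list(messages)
--     # skip the first (total - n_pairs) user messages, then everything up to
--     # (excluding) the next user message; return the suffix from there on.
--     skip = total - n_pairs
--     i = 0
--     while True:
--         if messages[i].get("role") == "user":
--             if skip == 0:
--                 return list(messages[i:])
--             skip -= 1
--         i += 1
-- ===== Notes on version B (the rewrite author's own statement) =====
-- stated objective: alternative
-- what changed: B replaces A's backward scan that accumulates a reversed tail with a break (then reverses it) by two forward passes: count the user messages, then skip the surplus leading users and return the remaining suffix directly.
import Mathlib
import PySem

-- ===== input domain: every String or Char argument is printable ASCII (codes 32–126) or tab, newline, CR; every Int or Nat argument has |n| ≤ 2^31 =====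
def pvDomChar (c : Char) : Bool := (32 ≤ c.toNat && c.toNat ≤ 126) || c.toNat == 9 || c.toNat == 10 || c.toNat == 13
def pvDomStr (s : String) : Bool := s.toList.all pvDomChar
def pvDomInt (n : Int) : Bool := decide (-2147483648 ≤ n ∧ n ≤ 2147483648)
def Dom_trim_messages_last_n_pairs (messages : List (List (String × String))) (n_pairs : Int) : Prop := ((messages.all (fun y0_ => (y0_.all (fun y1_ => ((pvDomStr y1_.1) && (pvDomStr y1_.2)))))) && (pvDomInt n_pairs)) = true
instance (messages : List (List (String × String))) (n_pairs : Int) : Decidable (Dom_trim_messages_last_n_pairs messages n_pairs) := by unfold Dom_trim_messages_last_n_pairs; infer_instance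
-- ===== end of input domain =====

-- B replaces A's backward accumulate-and-break scan (plus final reverse) by two forward
-- passes: count user messages, then skip the surplus leading ones and return the suffix.


-- ===== PORT A =====
-- m.get("role"): first-match lookup in the association list (exact for Python dict.get)
def pvRoleGet (m : List (String × String)) : Option String :=
  (m.find? (fun p => p.1 == "role")).map (·.2)

-- the 'for m in reversed(messages)' loop of A: state = (user_count, tail); break on count ≥ n
def pvAGo (n_pairs : Int) : List (List (String × String)) → Int → List (List (String × String)) → List (List (String × String))
  | [], _, tail => tail.reverse
  | m :: rest, user_count, tail =>
      let tail' := tail ++ [m]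
      if pvRoleGet m = some "user" then
        if user_count + 1 ≥ n_pairs then tail'.reverse
        else pvAGo n_pairs rest (user_count + 1) tail'
      else pvAGo n_pairs rest user_count tail'

def trim_messages_last_n_pairs (messages : List (List (String × String))) (n_pairs : Int) : List (List (String × String)) :=
  if n_pairs ≤ 0 then []
  else pvAGo n_pairs messages.reverse 0 []

-- ===== PORT B =====
def pvIsUser (m : List (String × String)) : Bool := pvRoleGet m == some "user"

-- Source B's index loop: walk forward, decrementing 'skip' at each user message,
-- and return the suffix at the user where skip reaches 0
def pvBSkip (skip : Int) : List (List (String × String)) → List (List (String × String))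
  | [] => []
  | m :: rest =>
      if pvIsUser m then
        if skip = 0 then m :: rest else pvBSkip (skip - 1) rest
      else pvBSkip skip rest

def trim_messages_last_n_pairs_alt (messages : List (List (String × String))) (n_pairs : Int) : List (List (String × String)) :=
  if n_pairs ≤ 0 then []
  else
    let total : Int := (messages.filter pvIsUser).length
    if total < n_pairs then messages
    else pvBSkip (total - n_pairs) messages

-- ===== PRECONDITION & SPEC =====
def Spec_trim_messages_last_n_pairs (messages : List (List (String × String))) (n_pairs : Int) (out : List (List (String × String))) : Prop := out = trim_messages_last_n_pairs_alt messages n_pairs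
instance (messages : List (List (String × String))) (n_pairs : Int) (out : List (List (String × String))) : Decidable (Spec_trim_messages_last_n_pairs messages n_pairs out) := by unfold Spec_trim_messages_last_n_pairs; infer_instance

-- ===== CLAIM (what is proved, stated in full; the proofs are below) =====
def Claim_equal_trim_messages_last_n_pairs : Prop := ∀ (messages : List (List (String × String))) (n_pairs : Int), Dom_trim_messages_last_n_pairs messages n_pairs → Spec_trim_messages_last_n_pairs messages n_pairs (trim_messages_last_n_pairs messages n_pairs)

-- ===== LEMMAS AND PROOFS =====
-- user-message count of a list, as an Int
def pvUC (l : List (List (String × String))) : Int := ((l.filter pvIsUser).length : Int)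

theorem pvUC_nonneg (l : List (List (String × String))) : 0 ≤ pvUC l := by
  simp [pvUC]

theorem pvUC_cons (m : List (String × String)) (l : List (List (String × String))) :
    pvUC (m :: l) = if pvIsUser m then pvUC l + 1 else pvUC l := by
  simp [pvUC, List.filter_cons]; split <;> simp

theorem pvUC_reverse (l : List (List (String × String))) : pvUC l.reverse = pvUC l := by
  simp [pvUC, List.filter_reverse]

-- if skip covers all users of l, pvBSkip passes through l entirely
theorem pvBSkip_ge (l l2 : List (List (String × String))) (k : Int) (h : pvUC l ≤ k) :
    pvBSkip k (l ++ l2) = pvBSkip (k - pvUC l) l2 := by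
  induction l generalizing k with
  | nil => simp [pvUC]
  | cons m rest ih =>
    rw [pvUC_cons] at h
    by_cases hu : pvIsUser m
    · have hrest := pvUC_nonneg rest
      have hk : ¬ k = 0 := by simp [hu] at h; omega
      simp only [List.cons_append, pvBSkip, hu, if_true, hk, if_false]
      rw [ih (k - 1) (by simp [hu] at h; omega)]
      rw [pvUC_cons]; simp [hu]; ring_nf
    · simp only [List.cons_append, pvBSkip, hu]
      rw [ih k (by simpa [hu] using h)]
      rw [pvUC_cons]; simp [hu]

-- if skip stops strictly inside l, the appended tail is carried along untouched
theorem pvBSkip_lt (l l2 : List (List (String × String))) (k : Int) (h0 : 0 ≤ k)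
    (h : k < pvUC l) : pvBSkip k (l ++ l2) = pvBSkip k l ++ l2 := by
  induction l generalizing k with
  | nil => simp [pvUC] at h; omega
  | cons m rest ih =>
    rw [pvUC_cons] at h
    by_cases hu : pvIsUser m
    · by_cases hk : k = 0
      · simp [pvBSkip, hu, hk]
      · simp only [List.cons_append, pvBSkip, hu, if_true, hk, if_false]
        exact ih (k - 1) (by omega) (by simp [hu] at h; omega)
    · simp only [List.cons_append, pvBSkip, hu]
      exact ih k h0 (by simpa [hu] using h)

-- main loop invariant: A's backward loop over l (with count cnt < n) equals
-- B's count-and-skip applied to l.reverse, followed by the already-collected tail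
theorem pvAGo_spec (n : Int) (l : List (List (String × String))) :
    ∀ (cnt : Int) (tail : List (List (String × String))), cnt < n →
    pvAGo n l cnt tail =
      (if pvUC l < n - cnt then l.reverse else pvBSkip (pvUC l - (n - cnt)) l.reverse)
        ++ tail.reverse := by
  induction l with
  | nil =>
    intro cnt tail h
    have : pvUC ([] : List (List (String × String))) = 0 := by simp [pvUC]
    simp [pvAGo, this]; omega
  | cons m rest ih =>
    intro cnt tail h
    rw [show (m :: rest).reverse = rest.reverse ++ [m] from by simp]
    rw [pvUC_cons]
    by_cases hu : pvIsUser m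
    · have hu' : pvRoleGet m = some "user" := by
        simpa [pvIsUser] using hu
      by_cases hb : cnt + 1 ≥ n
      · -- break: exactly one more user needed
        have hn : n - cnt = 1 := by omega
        simp only [pvAGo, hu', if_true, hb]
        have h1 : ¬ (pvUC rest + 1 < n - cnt) := by
          have := pvUC_nonneg rest; omega
        rw [if_pos hu, if_neg h1]
        have : pvUC rest + 1 - (n - cnt) = pvUC rest := by omega
        rw [this, show (pvUC rest) = pvUC rest.reverse from (pvUC_reverse rest).symm]
        rw [pvBSkip_ge rest.reverse [m] _ (le_refl _), sub_self]
        simp [pvBSkip, hu]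
      · have hb' : ¬ cnt + 1 ≥ n := hb
        simp only [pvAGo, hu', if_true, hb', if_false]
        rw [ih (cnt + 1) (tail ++ [m]) (by omega)]
        rw [if_pos hu]
        by_cases hc : pvUC rest < n - (cnt + 1)
        · rw [if_pos hc, if_pos (by omega)]
          simp
        · rw [if_neg hc, if_neg (by omega)]
          have hk0 : 0 ≤ pvUC rest - (n - (cnt + 1)) := by omega
          have hklt : pvUC rest - (n - (cnt + 1)) < pvUC rest.reverse := by
            rw [pvUC_reverse]; omega
          rw [show pvUC rest + 1 - (n - cnt) = pvUC rest - (n - (cnt + 1)) from by omega]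
          rw [pvBSkip_lt rest.reverse [m] _ hk0 (by rwa [pvUC_reverse] at hklt ⊢)]
          simp
    · have hu' : ¬ pvRoleGet m = some "user" := by
        simpa [pvIsUser] using hu
      simp only [pvAGo, hu', if_false]
      rw [ih cnt (tail ++ [m]) h, if_neg hu]
      by_cases hc : pvUC rest < n - cnt
      · rw [if_pos hc, if_pos hc]; simp
      · rw [if_neg hc, if_neg hc]
        have hk0 : 0 ≤ pvUC rest - (n - cnt) := by omega
        have hklt : pvUC rest - (n - cnt) < pvUC rest := by omega
        rw [pvBSkip_lt rest.reverse [m] _ hk0 (by rwa [pvUC_reverse])]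
        simp

-- ===== VERDICT (by name: the statement is the Claim_ definition above) =====
theorem trim_messages_last_n_pairs_spec : Claim_equal_trim_messages_last_n_pairs := by
  intro messages n_pairs _
  unfold Spec_trim_messages_last_n_pairs trim_messages_last_n_pairs trim_messages_last_n_pairs_alt
  by_cases h : n_pairs ≤ 0
  · simp [h]
  · rw [if_neg h, if_neg h]
    rw [pvAGo_spec n_pairs messages.reverse 0 [] (by omega)]
    rw [pvUC_reverse, List.reverse_reverse]
    simp only [List.reverse_nil, List.append_nil, sub_zero]
    show (if pvUC messages < n_pairs then messages else pvBSkip (pvUC messages - n_pairs) messages) = _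
    rfl
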